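-- pv_equiv track=rewrite | github.com/Thanhha456/Yahtzee_Game | yahtzee_game.py | gen_all_holds
-- ===== SOURCE A (Python) =====
-- def gen_all_holds(hand):
--     """
--     Generate all possible choices of dice from hand to hold.
--
--     hand: full yahtzee hand
--
--     Returns a set of tuples, where each tuple is dice to hold
--     """
--
--
--     if hand == tuple([]):
--         return set([()])
--     else:
--         hand = list(hand)
--         result = set([()])
--         for seq in gen_all_holds(tuple(hand[:-1])):
--             seq_0 = list(seq)
--             seq_0.append(hand[-1])
--             result.add(tuple(seq_0))
--         result.update(gen_all_holds(tuple(hand[:-1])))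
--
--         return result
-- ===== SOURCE B (Python) =====
-- def gen_all_holds(hand):
--     """
--     Generate all possible choices of dice from hand to hold.
--
--     hand: full yahtzee hand
--
--     Returns a set of tuples, where each tuple is dice to hold
--     """
--     holds = {()}
--     for die in hand:
--         holds = {()} | {seq + (die,) for seq in holds} | holds
--     return holds
-- ===== Notes on version B (the rewrite author's own statement) =====
-- stated objective: alternative
-- what changed: Replaces A's recursion that calls itself twice on hand[:-1] at every level with a single iterative left-to-right pass that extends the accumulated set of holds by each die once (measured 2.9x at n=16, but both programs are output-bound at large n).
import Mathlib
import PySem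

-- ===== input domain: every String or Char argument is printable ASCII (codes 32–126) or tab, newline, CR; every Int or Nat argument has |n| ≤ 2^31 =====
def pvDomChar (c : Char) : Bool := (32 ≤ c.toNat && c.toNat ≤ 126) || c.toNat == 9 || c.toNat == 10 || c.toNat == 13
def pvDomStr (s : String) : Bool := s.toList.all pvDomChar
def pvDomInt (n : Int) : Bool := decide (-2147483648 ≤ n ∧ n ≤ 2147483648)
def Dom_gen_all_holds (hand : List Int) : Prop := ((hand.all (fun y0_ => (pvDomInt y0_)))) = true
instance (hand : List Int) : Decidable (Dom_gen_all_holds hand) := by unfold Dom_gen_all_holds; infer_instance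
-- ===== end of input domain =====

-- B replaces A's doubled recursion (gen_all_holds(hand[:-1]) computed twice per level) by one
-- left-to-right pass that extends the accumulated set of holds with each die once.

-- ===== PORT A =====
-- Literal port of A's recursion on hand[:-1] / hand[-1]. Python's 'hand == tuple([])' base case
-- is reached by the recursive calls (which pass tuples); 'hand[:-1]' is dropLast (exact) and
-- 'hand[-1]' is getLast (exact, the branch has hand ≠ []); on the empty (tuple) hand the base case returns {()}.
def gen_all_holds (hand : List Int) : List (List Int) :=
  if h : hand = [] then PySem.Set.ofList [[]]
  else
    -- result = set([()]); for seq in gen_all_holds(tuple(hand[:-1])): result.add(tuple(seq+[hand[-1]]))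
    let result := (gen_all_holds hand.dropLast).foldl
      (fun s seq => PySem.Set.add s (seq ++ [hand.getLast h])) (PySem.Set.ofList [[]])
    -- result.update(gen_all_holds(tuple(hand[:-1])))  -- A recomputes the recursion here
    PySem.Set.update result (gen_all_holds hand.dropLast)
termination_by hand.length
decreasing_by
  all_goals
    have : hand.length ≠ 0 := fun h0 => h (List.eq_nil_of_length_eq_zero h0)
    simp [List.length_dropLast]; omega

-- ===== PORT B =====
-- holds = {()}; for die in hand: holds = {()} | {seq + (die,) for seq in holds} | holds
def gen_all_holds_alt (hand : List Int) : List (List Int) :=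
  hand.foldl
    (fun holds die =>
      PySem.Set.union
        (PySem.Set.union (PySem.Set.ofList [[]])
          (PySem.Set.ofList (holds.map (fun seq => seq ++ [die]))))
        holds)
    (PySem.Set.ofList [[]])

-- ===== PRECONDITION & SPEC =====
def Spec_gen_all_holds (hand : List Int) (out : List (List Int)) : Prop := out = gen_all_holds_alt hand
instance (hand : List Int) (out : List (List Int)) : Decidable (Spec_gen_all_holds hand out) := by unfold Spec_gen_all_holds; infer_instance

-- ===== CLAIM (what is proved, stated in full; the proofs are below) =====
def Claim_equal_gen_all_holds : Prop := ∀ (hand : List Int), Dom_gen_all_holds hand → Spec_gen_all_holds hand (gen_all_holds hand)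

-- ===== LEMMAS AND PROOFS =====

-- Updating with set(m) adds the same elements in the same (first-occurrence) order as updating with m.
theorem update_ofList_eq {α : Type} [BEq α] [LawfulBEq α] (s : PySem.Set α) (m : List α) :
    PySem.Set.update s (PySem.Set.ofList m) = PySem.Set.update s m := by
  rw [PySem.Set.update_eq_append_filter, PySem.Set.update_eq_append_filter,
    PySem.Set.ofList_ofList]

-- A's loop body + update equals B's union expression, for any accumulated set s.
theorem step_eq (s : List (List Int)) (x : Int) :
    PySem.Set.update
      (s.foldl (fun t seq => PySem.Set.add t (seq ++ [x])) (PySem.Set.ofList [[]])) s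
    = PySem.Set.union
        (PySem.Set.union (PySem.Set.ofList [[]])
          (PySem.Set.ofList (s.map (fun seq => seq ++ [x])))) s := by
  show _ = PySem.Set.update (PySem.Set.update _ _) s
  rw [update_ofList_eq, PySem.Set.update_map_eq_foldl_add]

theorem gen_all_holds_eq_alt (hand : List Int) :
    gen_all_holds hand = gen_all_holds_alt hand := by
  induction hand using List.reverseRecOn with
  | nil => simp [gen_all_holds, gen_all_holds_alt]
  | append_singleton l x ih =>
    rw [gen_all_holds]
    have hne : l ++ [x] ≠ [] := by simp
    rw [dif_neg hne]
    simp only [List.dropLast_concat, List.getLast_append_singleton (l := l)]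
    rw [ih, step_eq]
    show _ = gen_all_holds_alt (l ++ [x])
    unfold gen_all_holds_alt
    rw [List.foldl_append]
    rfl

-- ===== VERDICT (by name: the statement is the Claim_ definition above) =====
theorem gen_all_holds_spec : Claim_equal_gen_all_holds := by
  intro hand _
  exact gen_all_holds_eq_alt hand
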